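-- pv_equiv track=rewrite | github.com/ronimizy/ITMO | 1_sem/DigitlCulture/4/main.py | resize_char_to_capital
-- ===== SOURCE A (Python) =====
-- def resize_char_to_capital(str1, idx):    # изменить строчную букву на заглавную
--     result = ''
--     for i in range(len(str1)):
--         if i == idx:
--             result += str1[i].upper()
--         else:
--             result += str1[i]
--     return result
-- ===== SOURCE B (Python) =====
-- def resize_char_to_capital(str1, idx):
--     if 0 <= idx < len(str1):
--         return str1[:idx] + str1[idx].upper() + str1[idx+1:]
--     return str1
-- ===== Notes on version B (the rewrite author's own statement) =====
-- stated objective: simpler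
-- what changed: Replaced the character-by-character accumulation loop with a bounds-guarded slice-and-splice (str1[:idx] + str1[idx].upper() + str1[idx+1:]); out-of-range or negative idx returns the string unchanged, as in A.
import Mathlib
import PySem

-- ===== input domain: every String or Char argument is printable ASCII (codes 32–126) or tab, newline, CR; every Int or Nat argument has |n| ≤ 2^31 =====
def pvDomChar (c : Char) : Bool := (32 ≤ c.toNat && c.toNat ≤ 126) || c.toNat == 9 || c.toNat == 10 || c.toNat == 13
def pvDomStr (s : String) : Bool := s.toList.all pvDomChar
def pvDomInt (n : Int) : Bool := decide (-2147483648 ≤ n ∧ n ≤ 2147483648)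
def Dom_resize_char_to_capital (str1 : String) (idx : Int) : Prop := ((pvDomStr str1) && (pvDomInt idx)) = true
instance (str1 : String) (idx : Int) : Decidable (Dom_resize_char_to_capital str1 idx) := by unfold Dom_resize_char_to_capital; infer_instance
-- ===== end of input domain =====

-- B replaces A's character-by-character accumulation loop with a bounds-guarded slice-and-splice (simpler; same return value).

-- ===== PORT A =====
-- result = ''; for i in range(len(str1)): result += str1[i].upper() if i == idx else str1[i]
def resize_char_to_capital (str1 : String) (idx : Int) : String :=
  let cs := str1.toList
  String.ofList ((PySem.List.pyRange 0 (cs.length : Int)).foldl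
    (fun result i =>
      result ++ (if i == idx then PySem.Chars.upper [PySem.List.pyGetD cs i ' ']
                 else [PySem.List.pyGetD cs i ' ']))
    [])

-- ===== PORT B =====
-- if 0 <= idx < len(str1): return str1[:idx] + str1[idx].upper() + str1[idx+1:]; return str1
def resize_char_to_capital_alt (str1 : String) (idx : Int) : String :=
  let cs := str1.toList
  if 0 ≤ idx ∧ idx < (cs.length : Int) then
    String.ofList (PySem.List.slice cs none (some idx)
      ++ PySem.Chars.upper [PySem.List.pyGetD cs idx ' ']
      ++ PySem.List.slice cs (some (idx + 1)) none)
  else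
    str1

-- ===== PRECONDITION & SPEC =====
def Spec_resize_char_to_capital (str1 : String) (idx : Int) (out : String) : Prop := out = resize_char_to_capital_alt str1 idx
instance (str1 : String) (idx : Int) (out : String) : Decidable (Spec_resize_char_to_capital str1 idx out) := by unfold Spec_resize_char_to_capital; infer_instance

-- ===== CLAIM (what is proved, stated in full; the proofs are below) =====
def Claim_equal_resize_char_to_capital : Prop := ∀ (str1 : String) (idx : Int), Dom_resize_char_to_capital str1 idx → Spec_resize_char_to_capital str1 idx (resize_char_to_capital str1 idx)

-- ===== LEMMAS AND PROOFS =====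

lemma map_getD_range (cs : List Char) (d : Char) :
    (List.range cs.length).map (fun k => cs.getD k d) = cs := by
  apply List.ext_getElem
  · simp
  · intro i h1 h2
    simp [List.getD_eq_getElem?_getD, List.getElem?_eq_getElem h2]

-- A's loop, written as a map over the index range.
lemma loopA_eq_map (cs : List Char) (idx : Int) :
    ((PySem.List.pyRange 0 (cs.length : Int)).foldl
      (fun result i =>
        result ++ (if i == idx then PySem.Chars.upper [PySem.List.pyGetD cs i ' ']
                   else [PySem.List.pyGetD cs i ' ']))
      [])
    = (List.range cs.length).map
        (fun (k : Nat) => if ((k : Int) = idx) then PySem.Chars.upperChar (cs.getD k ' ') else cs.getD k ' ') := by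
  rw [PySem.List.pyRange_one, List.foldl_map]
  simp only [Int.sub_zero, Int.toNat_natCast, zero_add]
  have hbody : (fun (result : List Char) (k : Nat) =>
        result ++ (if ((k : Int) == idx) then PySem.Chars.upper [PySem.List.pyGetD cs (k : Int) ' ']
                   else [PySem.List.pyGetD cs (k : Int) ' ']))
      = (fun (result : List Char) (k : Nat) =>
        result ++ [if ((k : Int) = idx) then PySem.Chars.upperChar (cs.getD k ' ') else cs.getD k ' ']) := by
    funext result k
    simp only [beq_iff_eq, PySem.List.pyGetD_natCast]
    by_cases h : (k : Int) = idx
    · rw [if_pos h, if_pos h]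
      simp [PySem.Chars.upper]
    · rw [if_neg h, if_neg h]
  rw [hbody, PySem.List.foldl_append_singleton_eq_map, List.nil_append]

-- What that map computes: splice when idx is in range, the list unchanged otherwise.
lemma mapA (cs : List Char) (idx : Int) :
    (List.range cs.length).map
      (fun (k : Nat) => if ((k : Int) = idx) then PySem.Chars.upperChar (cs.getD k ' ') else cs.getD k ' ')
    = if 0 ≤ idx ∧ idx < (cs.length : Int) then
        cs.take idx.toNat ++ PySem.Chars.upper [cs.getD idx.toNat ' '] ++ cs.drop (idx.toNat + 1)
      else cs := by
  split
  · rename_i h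
    obtain ⟨h0, hlt⟩ := h
    set j := idx.toNat with hj
    have hj' : (j : Int) = idx := Int.toNat_of_nonneg h0
    have hjn : j < cs.length := by omega
    have hup : PySem.Chars.upper [cs.getD j ' '] = [PySem.Chars.upperChar (cs.getD j ' ')] := by
      simp [PySem.Chars.upper]
    rw [hup]
    have hlen : (List.take j cs).length = j := by simp; omega
    apply List.ext_getElem
    · simp; omega
    · intro i hi1 hi2
      have hin : i < cs.length := by simpa using hi1
      simp only [List.getElem_map, List.getElem_range]
      by_cases hij : i = j
      · subst hij
        rw [if_pos hj', List.getElem_append_left (by simp; omega),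
            List.getElem_append_right (by omega)]
        simp [hlen, List.getD_eq_getElem?_getD, List.getElem?_eq_getElem hjn]
      · rw [if_neg (by omega)]
        by_cases hlt' : i < j
        · rw [List.getElem_append_left (by simp; omega), List.getElem_append_left (by omega)]
          simp [List.getD_eq_getElem?_getD, List.getElem?_eq_getElem hin, List.getElem_take]
        · rw [List.getElem_append_right (by simp; omega)]
          simp only [List.getElem_drop, List.length_append, hlen, List.length_cons, List.length_nil]
          simp only [List.getD_eq_getElem?_getD, List.getElem?_eq_getElem hin, Option.getD_some]
          congr 1
          omega
  · rename_i h
    have hnk : ∀ k, k < cs.length → ¬ ((k : Int) = idx) := by intro k hk; omega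
    calc (List.range cs.length).map
          (fun (k : Nat) => if ((k : Int) = idx) then PySem.Chars.upperChar (cs.getD k ' ') else cs.getD k ' ')
        = (List.range cs.length).map (fun k => cs.getD k ' ') := by
          apply List.map_congr_left; intro k hk; rw [if_neg (hnk k (List.mem_range.mp hk))]
      _ = cs := map_getD_range cs ' '

-- ===== VERDICT (by name: the statement is the Claim_ definition above) =====
theorem resize_char_to_capital_spec : Claim_equal_resize_char_to_capital := by
  intro str1 idx _
  unfold Spec_resize_char_to_capital resize_char_to_capital resize_char_to_capital_alt
  simp only []
  rw [loopA_eq_map, mapA]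
  split
  · rename_i h
    obtain ⟨h0, hlt⟩ := h
    rw [PySem.List.slice_to str1.toList h0, PySem.List.slice_from str1.toList (by omega : (0:Int) ≤ idx + 1),
        PySem.List.pyGetD_of_nonneg _ _ h0]
    have : (idx + 1).toNat = idx.toNat + 1 := by omega
    rw [this]
  · rw [String.ofList_toList]
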